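-- pv_equiv track=rewrite | github.com/Felipe7002/Comp-sci-2 | list_project_name.py | get_last_name
-- ===== SOURCE A (Python) =====
-- def get_last_name(name):
--     last_name = ""
--     for i in range(len(name)-1, -1, -1):
--         if name[i] != " ":
--             last_name = name[i] + last_name
--         else:
--             break
--     return last_name
-- ===== SOURCE B (Python) =====
-- def get_last_name(name):
--     last = ""
--     for c in name:
--         if c == " ":
--             last = ""
--         else:
--             last = last + c
--     return last
-- ===== Notes on version B (the rewrite author's own statement) =====
-- stated objective: alternative
-- what changed: B replaces A's backward scan with early break (prepending characters until the first space from the end) by a single forward pass that rebuilds the current word by appending and resets it to empty at every space.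
import Mathlib
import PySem

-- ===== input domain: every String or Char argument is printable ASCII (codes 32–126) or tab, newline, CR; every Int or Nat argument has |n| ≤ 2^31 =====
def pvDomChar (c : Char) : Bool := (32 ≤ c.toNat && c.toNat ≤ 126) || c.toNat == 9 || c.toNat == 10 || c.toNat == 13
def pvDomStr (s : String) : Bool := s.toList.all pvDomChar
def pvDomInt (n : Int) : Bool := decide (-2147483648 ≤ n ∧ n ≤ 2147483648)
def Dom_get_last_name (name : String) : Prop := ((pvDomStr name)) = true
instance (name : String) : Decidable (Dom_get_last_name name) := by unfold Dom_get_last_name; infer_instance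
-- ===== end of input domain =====

-- B replaces A's backward scan-with-break by a single forward pass that resets the word at each space; same return value on every string.


-- ===== PORT A =====
-- backward loop over the indices: iterate the reversed character list, prepending until a space breaks the loop
def get_last_name_go (acc : List Char) : List Char → List Char
  | [] => acc
  | c :: rest => if c = ' ' then acc else get_last_name_go (c :: acc) rest

def get_last_name (name : String) : String :=
  String.mk (get_last_name_go [] name.toList.reverse)

-- ===== PORT B =====
def get_last_name_alt (name : String) : String :=
  String.mk (name.toList.foldl (fun acc c => if c = ' ' then [] else acc ++ [c]) [])

-- ===== PRECONDITION & SPEC =====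
def Spec_get_last_name (name : String) (out : String) : Prop := out = get_last_name_alt name
instance (name : String) (out : String) : Decidable (Spec_get_last_name name out) := by unfold Spec_get_last_name; infer_instance

-- ===== CLAIM (what is proved, stated in full; the proofs are below) =====
def Claim_equal_get_last_name : Prop := ∀ (name : String), Dom_get_last_name name → Spec_get_last_name name (get_last_name name)

-- ===== LEMMAS AND PROOFS =====
theorem get_last_name_go_eq (l acc : List Char) :
    get_last_name_go acc l = (l.takeWhile (fun c => !(c = ' '))).reverse ++ acc := by
  induction l generalizing acc with
  | nil => simp [get_last_name_go]
  | cons c rest ih =>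
    by_cases h : c = ' ' <;> simp [get_last_name_go, h, ih]

theorem foldl_eq_takeWhile_rev (l : List Char) :
    l.foldl (fun acc c => if c = ' ' then [] else acc ++ [c]) []
      = ((l.reverse.takeWhile (fun c => !(c = ' '))).reverse) := by
  induction l using List.reverseRecOn with
  | nil => simp
  | append_singleton l c ih =>
    by_cases h : c = ' ' <;>
      simp [List.foldl_append, h, ih]

-- ===== VERDICT (by name: the statement is the Claim_ definition above) =====
theorem get_last_name_spec : Claim_equal_get_last_name := by
  intro name _
  unfold Spec_get_last_name get_last_name get_last_name_alt
  rw [get_last_name_go_eq, foldl_eq_takeWhile_rev]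
  simp
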